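-- pv_equiv track=rewrite | github.com/MengXiangxi/QJZeditor | QJZEditor_2_3_1_py3k.py | divide2lines
-- ===== SOURCE A (Python) =====
-- def divide2lines(editorlist):
--     errdict = {} # 记录每种断行方式的长度差绝对值
--     # 评估所有可能性
--     for i in range(1, len(editorlist)): # 遍历所有不同的断行可能性
--         lenline1 = 0 # 第一行的长度
--         lenline2 = 0 # 第二行的长度
--         for j in range(0,i):
--             lenline1 += len(editorlist[j])+1 #第一行所有元素的长度和（多一个空格）
--         for k in range(i,len(editorlist)):
--             lenline2 += len(editorlist[k])+1 #第二行所有元素的长度和（多一个空格）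
--         errdict[i] = abs(lenline2-lenline1) # 长度差（多的空格不影响）存入列表
--     # 选择最佳方案
--     sorterrlist = [] # 用于选择最优方案（长度差最小）
--     for i in range(1,len(editorlist)): # 将字典的值转写入列表sorterrlist[]
--         sorterrlist.append(errdict[i])
--     sorterrlist.sort() # 对sorterrlist[]进行排序
--     for i in range(1, len(editorlist)):
--         if errdict[i] == sorterrlist[0]: # 找到第一个errdict[]中与最小值相对应的下标
--             linebreakkey = i # 将下标存入linebreak
--             break # 跳出
--     # 准备输出
--     editortwoline = [] # 返回值
--     editortwoline1 = [] # 返回值第一行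
--     editortwoline2 = [] # 返回值第二行
--     for i in range(0,len(editorlist)): # 遍历editorlist
--         if i < linebreakkey: # linebreakkey之前的属于第一行
--             editortwoline1.append(editorlist[i])
--         else: # linebreakkey之后的属于第二行
--             editortwoline2.append(editorlist[i])
--     editortwoline.append(editortwoline1) # 分别连接两行
--     editortwoline.append(editortwoline2)
--     return editortwoline
-- ===== SOURCE B (Python) =====
-- def divide2lines(editorlist):
--     # One pass with a running prefix sum: err(i) = |total - 2*left(i)|,
--     # keep the first index attaining the minimum.
--     total = sum(len(w) + 1 for w in editorlist)
--     best_i = 0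
--     best_err = None
--     left = 0
--     for i in range(1, len(editorlist)):
--         left += len(editorlist[i - 1]) + 1
--         err = abs(total - 2 * left)
--         if best_err is None or err < best_err:
--             best_i = i
--             best_err = err
--     return [editorlist[:best_i], editorlist[best_i:]]
-- ===== Notes on version B (the rewrite author's own statement) =====
-- stated objective: faster
-- what changed: Replaces the quadratic re-summation of both halves per split point, the dict of errors, the sort-to-find-the-minimum and the index-scan output loop by a single pass over a running prefix sum that tracks the first index of minimal |total-2*left|, then slices.
import Mathlib
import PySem

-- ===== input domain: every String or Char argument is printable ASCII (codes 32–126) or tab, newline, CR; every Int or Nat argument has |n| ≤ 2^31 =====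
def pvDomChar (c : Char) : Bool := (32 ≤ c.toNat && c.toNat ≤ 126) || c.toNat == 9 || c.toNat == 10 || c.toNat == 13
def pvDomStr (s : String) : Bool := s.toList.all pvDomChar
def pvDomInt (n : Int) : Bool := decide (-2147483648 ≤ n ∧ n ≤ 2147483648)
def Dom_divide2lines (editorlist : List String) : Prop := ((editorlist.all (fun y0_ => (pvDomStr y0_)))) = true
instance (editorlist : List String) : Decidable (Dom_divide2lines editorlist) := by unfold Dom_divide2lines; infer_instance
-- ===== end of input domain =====

-- B replaces A's per-split re-summation of both halves, error dict, sort and first-match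
-- scan by one pass over a running prefix sum (objective: faster).

-- ===== PORT A =====
-- Transliteration notes: each local of A becomes a helper over editorlist; all
-- editorlist[j] indices lie in range in A's loops, so pyGetD is exact; sorterrlist[0]
-- is only read when n ≥ 2, where the list is nonempty (pyGetD exact); linebreakkey is
-- an Option — 'none' at the final loop is Python's UnboundLocalError (exactly
-- length 1, excluded by Pre_), modeled by getD 0 there.

-- value inserted for key i: errdict[i] = abs(lenline2 - lenline1)
def aErrVal (editorlist : List String) (i : Int) : Int :=
  let lenline1 := (PySem.List.pyRange 0 i 1).foldl
    (fun acc j => acc + (PySem.Str.len (PySem.List.pyGetD editorlist j "") + 1)) 0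
  let lenline2 := (PySem.List.pyRange i (PySem.List.len editorlist) 1).foldl
    (fun acc k => acc + (PySem.Str.len (PySem.List.pyGetD editorlist k "") + 1)) 0
  |lenline2 - lenline1|

def aErrdict (editorlist : List String) : PySem.Dict Int Int :=
  (PySem.List.pyRange 1 (PySem.List.len editorlist) 1).foldl
    (fun d i => d.insert i (aErrVal editorlist i)) PySem.Dict.empty

def aSorterrlist (editorlist : List String) : List Int :=
  (PySem.List.pyRange 1 (PySem.List.len editorlist) 1).foldl
    (fun l i => l ++ [(aErrdict editorlist).getD i 0]) []

def aSortedlist (editorlist : List String) : List Int :=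
  PySem.List.sorted (aSorterrlist editorlist) (fun x => x) false

def aLinebreak (editorlist : List String) : Option Int :=
  (PySem.List.pyRange 1 (PySem.List.len editorlist) 1).foldl
    (fun acc i => match acc with
      | some _ => acc
      | none =>
        if (aErrdict editorlist).getD i 0 = PySem.List.pyGetD (aSortedlist editorlist) 0 0
        then some i else none) none

def divide2lines (editorlist : List String) : List (List String) :=
  let pair :=
    (PySem.List.pyRange 0 (PySem.List.len editorlist) 1).foldl
      (fun (p : List String × List String) i =>
        if i < (aLinebreak editorlist).getD 0 then (p.1 ++ [PySem.List.pyGetD editorlist i ""], p.2)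
        else (p.1, p.2 ++ [PySem.List.pyGetD editorlist i ""])) ([], [])
  [pair.1, pair.2]

-- ===== PORT B =====
def divide2lines_alt (editorlist : List String) : List (List String) :=
  let total : Int := editorlist.foldl (fun a w => a + (PySem.Str.len w + 1)) 0
  let st :=
    (PySem.List.pyRange 1 (PySem.List.len editorlist) 1).foldl
      (fun (s : Int × Option Int × Int) i =>
        let left := s.2.2 + (PySem.Str.len (PySem.List.pyGetD editorlist (i - 1) "") + 1)
        let err := |total - 2 * left|
        match s.2.1 with
        | none => (i, some err, left)
        | some be => if err < be then (i, some err, left) else (s.1, some be, left))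
      (0, none, 0)
  [PySem.List.slice editorlist none (some st.1), PySem.List.slice editorlist (some st.1) none]

-- ===== PRECONDITION & SPEC =====
-- Pre_ excludes only single-element lists, on which A raises UnboundLocalError.
def Pre_divide2lines (editorlist : List String) : Prop := editorlist.length ≠ 1
instance (editorlist : List String) : Decidable (Pre_divide2lines editorlist) := by
  unfold Pre_divide2lines; infer_instance
def pvWitness_divide2lines : List String := ["ab", "c", "de"]

def Spec_divide2lines (editorlist : List String) (out : List (List String)) : Prop :=
  out = divide2lines_alt editorlist
instance (editorlist : List String) (out : List (List String)) :
    Decidable (Spec_divide2lines editorlist out) := by unfold Spec_divide2lines; infer_instance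

-- ===== CLAIM (what is proved, stated in full; the proofs are below) =====
def Claim_equal_divide2lines : Prop := ∀ (editorlist : List String),
  Dom_divide2lines editorlist → Pre_divide2lines editorlist →
  Spec_divide2lines editorlist (divide2lines editorlist)

-- ===== LEMMAS AND PROOFS =====

-- weight of one word: len(w) + 1
def pvW (w : String) : Int := PySem.Str.len w + 1
-- prefix sum of weights of the first k words
def pvL (xs : List String) (k : Nat) : Int := ((xs.take k).map pvW).sum
-- total weight
def pvT (xs : List String) : Int := (xs.map pvW).sum
-- imbalance of splitting before index k
def pvE (xs : List String) (k : Nat) : Int := |pvT xs - 2 * pvL xs k|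

-- first argmin of pvE over 1..m, with the minimal value
def pvBM (xs : List String) : Nat → Nat × Int
  | 0 => (0, 0)
  | 1 => (1, pvE xs 1)
  | (m+2) =>
    if pvE xs (m+2) < (pvBM xs (m+1)).2 then (m+2, pvE xs (m+2)) else pvBM xs (m+1)

theorem pvL_zero (xs : List String) : pvL xs 0 = 0 := rfl

theorem pvL_succ (xs : List String) (m : Nat) (h : m < xs.length) :
    pvL xs (m + 1) = pvL xs m + pvW xs[m] := by
  unfold pvL
  have h' : m < (List.map pvW xs).length := by simpa using h
  rw [List.map_take, List.map_take, List.take_add_one, List.getElem?_eq_getElem h']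
  simp

theorem pvT_split (xs : List String) (k : Nat) :
    pvT xs = pvL xs k + ((xs.drop k).map pvW).sum := by
  unfold pvT pvL
  rw [← List.sum_append, ← List.map_append, List.take_append_drop]

theorem pvBM_props (xs : List String) (m : Nat) (hm : 1 ≤ m) :
    1 ≤ (pvBM xs m).1 ∧ (pvBM xs m).1 ≤ m ∧ (pvBM xs m).2 = pvE xs (pvBM xs m).1 ∧
    (∀ j, 1 ≤ j → j ≤ m → (pvBM xs m).2 ≤ pvE xs j) ∧
    (∀ j, 1 ≤ j → j < (pvBM xs m).1 → (pvBM xs m).2 < pvE xs j) := by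
  induction m with
  | zero => omega
  | succ t ih =>
    rcases Nat.eq_zero_or_pos t with h0 | hpos
    · subst h0
      refine ⟨le_rfl, le_rfl, rfl, ?_, ?_⟩
      · intro j h1 h2; have : j = 1 := by omega
        subst this; simp [pvBM]
      · intro j h1 h2; simp [pvBM] at h2; omega
    · obtain ⟨i1, i2, i3, i4, i5⟩ := ih hpos
      obtain ⟨t', rfl⟩ : ∃ t', t = t' + 1 := ⟨t - 1, by omega⟩
      by_cases hlt : pvE xs (t' + 2) < (pvBM xs (t' + 1)).2
      · have hbm : pvBM xs (t' + 2) = (t' + 2, pvE xs (t' + 2)) := by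
          rw [pvBM, if_pos hlt]
        rw [hbm]
        refine ⟨by omega, le_rfl, rfl, ?_, ?_⟩
        · intro j h1 h2
          rcases Nat.lt_or_ge j (t' + 2) with hj | hj
          · exact le_of_lt (lt_of_lt_of_le hlt (i4 j h1 (by omega)))
          · have : j = t' + 2 := by omega
            subst this; exact le_rfl
        · intro j h1 h2
          exact lt_of_lt_of_le hlt (i4 j h1 (by omega))
      · have hbm : pvBM xs (t' + 2) = pvBM xs (t' + 1) := by
          rw [pvBM, if_neg hlt]
        rw [hbm]
        refine ⟨i1, by omega, i3, ?_, i5⟩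
        intro j h1 h2
        rcases Nat.lt_or_ge j (t' + 2) with hj | hj
        · exact i4 j h1 (by omega)
        · have : j = t' + 2 := by omega
          subst this; omega

-- segment-sum shape of A's inner loops
theorem pvSeg_foldl (xs : List String) (a k : Nat) (c : Int) (h : a + k ≤ xs.length) :
    (PySem.List.pyRange (a : Int) ((a : Int) + (k : Int)) 1).foldl
      (fun acc j => acc + (PySem.Str.len (PySem.List.pyGetD xs j "") + 1)) c
    = c + (((xs.drop a).take k).map pvW).sum := by
  induction k with
  | zero => simp [PySem.List.pyRange_one_eq_nil]
  | succ m ih =>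
    have h1 : a + m ≤ xs.length := by omega
    have hr : PySem.List.pyRange (a : Int) ((a : Int) + ((m : Int) + 1)) 1
        = PySem.List.pyRange (a : Int) ((a : Int) + (m : Int)) 1 ++ [(a : Int) + (m : Int)] := by
      have := PySem.List.pyRange_one_succ_right (a := (a : Int)) (b := (a : Int) + (m : Int)) (by omega)
      simpa [add_assoc] using this
    have hcast : ((m : Int) + 1) = ((m + 1 : Nat) : Int) := by push_cast; ring
    rw [← hcast, hr, List.foldl_append, ih h1]
    have hidx : (a : Int) + (m : Int) = ((a + m : Nat) : Int) := by push_cast; ring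
    have hlt : a + m < xs.length := by omega
    have hget : PySem.List.pyGetD xs ((a : Int) + (m : Int)) "" = xs[a + m] := by
      rw [hidx, PySem.List.pyGetD_natCast]
      exact List.getD_eq_getElem xs "" hlt
    have htake : (xs.drop a).take (m + 1) = (xs.drop a).take m ++ [xs[a + m]] := by
      rw [List.take_add_one]
      have : (xs.drop a)[m]? = some xs[a + m] := by
        rw [List.getElem?_drop]
        exact List.getElem?_eq_getElem hlt
      simp [this]
    simp only [List.foldl_cons, List.foldl_nil, hget, htake, List.map_append, List.sum_append]
    simp [pvW]
    ring

-- the break-at-first-match loop is find?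
theorem pvFoldl_find (p : Int → Prop) [DecidablePred p] (l : List Int) :
    l.foldl (fun acc i => match acc with
      | some _ => acc
      | none => if p i then some i else none) none = l.find? (fun i => decide (p i)) := by
  induction l with
  | nil => rfl
  | cons x t ih =>
    simp only [List.foldl_cons, List.find?]
    by_cases h : p x
    · simp only [h, decide_true, if_pos]
      clear ih
      induction t with
      | nil => rfl
      | cons y u ih2 => simpa using ih2
    · simp [h, ih]

-- output loop: the first-line part
theorem pvOutA (xs : List String) (k : Nat) (hk : k ≤ xs.length) :
    ∀ (j : Nat), j ≤ k → ∀ (l1 l2 : List String),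
    (PySem.List.pyRange 0 (j : Int) 1).foldl
      (fun (p : List String × List String) i =>
        if i < (k : Int) then (p.1 ++ [PySem.List.pyGetD xs i ""], p.2)
        else (p.1, p.2 ++ [PySem.List.pyGetD xs i ""])) (l1, l2)
    = (l1 ++ xs.take j, l2) := by
  intro j
  induction j with
  | zero => intro _ l1 l2; simp [PySem.List.pyRange_one_eq_nil]
  | succ m ih =>
    intro hj l1 l2
    have hr : PySem.List.pyRange 0 ((m : Int) + 1) 1
        = PySem.List.pyRange 0 (m : Int) 1 ++ [(m : Int)] := by
      simpa using PySem.List.pyRange_one_succ_right (a := 0) (b := (m : Int)) (by omega)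
    have hcast : ((m + 1 : Nat) : Int) = (m : Int) + 1 := by push_cast; ring
    rw [hcast, hr, List.foldl_append, ih (by omega) l1 l2]
    have hlt : m < xs.length := by omega
    have hget : PySem.List.pyGetD xs (m : Int) "" = xs[m] :=
      by rw [PySem.List.pyGetD_natCast]; exact List.getD_eq_getElem xs "" hlt
    have hc : ((m : Int) < (k : Int)) := by exact_mod_cast (by omega : m < k)
    simp only [List.foldl_cons, List.foldl_nil, if_pos hc, hget]
    have : xs.take (m + 1) = xs.take m ++ [xs[m]] := by
      rw [List.take_add_one]; simp [List.getElem?_eq_getElem hlt]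
    rw [this, List.append_assoc]

-- output loop: the second-line part
theorem pvOutB (xs : List String) (k : Nat) :
    ∀ (d : Nat), k + d ≤ xs.length → ∀ (l1 l2 : List String),
    (PySem.List.pyRange (k : Int) ((k : Int) + (d : Int)) 1).foldl
      (fun (p : List String × List String) i =>
        if i < (k : Int) then (p.1 ++ [PySem.List.pyGetD xs i ""], p.2)
        else (p.1, p.2 ++ [PySem.List.pyGetD xs i ""])) (l1, l2)
    = (l1, l2 ++ (xs.drop k).take d) := by
  intro d
  induction d with
  | zero => intro _ l1 l2; simp [PySem.List.pyRange_one_eq_nil]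
  | succ m ih =>
    intro hd l1 l2
    have hr : PySem.List.pyRange (k : Int) ((k : Int) + ((m : Int) + 1)) 1
        = PySem.List.pyRange (k : Int) ((k : Int) + (m : Int)) 1 ++ [(k : Int) + (m : Int)] := by
      have := PySem.List.pyRange_one_succ_right (a := (k : Int)) (b := (k : Int) + (m : Int)) (by omega)
      simpa [add_assoc] using this
    have hcast : ((m : Int) + 1) = ((m + 1 : Nat) : Int) := by push_cast; ring
    rw [← hcast, hr, List.foldl_append, ih (by omega) l1 l2]
    have hlt : k + m < xs.length := by omega
    have hidx : (k : Int) + (m : Int) = ((k + m : Nat) : Int) := by push_cast; ring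
    have hget : PySem.List.pyGetD xs ((k : Int) + (m : Int)) "" = xs[k + m] := by
      rw [hidx, PySem.List.pyGetD_natCast]; exact List.getD_eq_getElem xs "" hlt
    have hc : ¬ ((k : Int) + (m : Int) < (k : Int)) := by omega
    simp only [List.foldl_cons, List.foldl_nil, if_neg hc, hget]
    have : (xs.drop k).take (m + 1) = (xs.drop k).take m ++ [xs[k + m]] := by
      rw [List.take_add_one]
      have : (xs.drop k)[m]? = some xs[k + m] := by
        rw [List.getElem?_drop]; exact List.getElem?_eq_getElem hlt
      simp [this]
    rw [this, List.append_assoc]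

-- the output loop builds (take k, drop k)
theorem pvOut_foldl (xs : List String) (k : Nat) (hk : k ≤ xs.length) :
    (PySem.List.pyRange 0 (xs.length : Int) 1).foldl
      (fun (p : List String × List String) i =>
        if i < (k : Int) then (p.1 ++ [PySem.List.pyGetD xs i ""], p.2)
        else (p.1, p.2 ++ [PySem.List.pyGetD xs i ""])) ([], [])
    = (xs.take k, xs.drop k) := by
  have hsplit := PySem.List.pyRange_one_append 0 (k : Int) (xs.length : Int)
    (by omega) (by exact_mod_cast hk)
  rw [hsplit, List.foldl_append, pvOutA xs k hk k le_rfl [] []]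
  have hlen : (xs.length : Int) = (k : Int) + ((xs.length - k : Nat) : Int) := by omega
  simp only [List.nil_append]
  rw [hlen, pvOutB xs k (xs.length - k) (by omega) (xs.take k) []]
  simp only [List.nil_append, Prod.mk.injEq, true_and]
  exact List.take_of_length_le (by simp)

-- A's inner loops compute the prefix-sum imbalance
theorem aErrVal_eq (xs : List String) (i : Int) (h1 : 1 ≤ i) (h2 : i < (xs.length : Int)) :
    aErrVal xs i = pvE xs i.toNat := by
  unfold aErrVal
  simp only [PySem.List.len_eq]
  have hi0 : (0 : Int) ≤ i := by omega
  have hitn : i = ((i.toNat : Nat) : Int) := by omega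
  have hlen : i.toNat ≤ xs.length := by omega
  have e1 : (PySem.List.pyRange 0 i 1).foldl
      (fun acc j => acc + (PySem.Str.len (PySem.List.pyGetD xs j "") + 1)) 0
      = pvL xs i.toNat := by
    have h0 : i = ((0 : Nat) : Int) + ((i.toNat : Nat) : Int) := by omega
    rw [show PySem.List.pyRange 0 i 1
        = PySem.List.pyRange ((0 : Nat) : Int) (((0 : Nat) : Int) + ((i.toNat : Nat) : Int)) 1 by
      rw [← h0]; norm_num]
    rw [pvSeg_foldl xs 0 i.toNat 0 (by omega)]
    simp [pvL]
  have e2 : (PySem.List.pyRange i (xs.length : Int) 1).foldl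
      (fun acc k => acc + (PySem.Str.len (PySem.List.pyGetD xs k "") + 1)) 0
      = ((xs.drop i.toNat).map pvW).sum := by
    have h0 : (xs.length : Int) = ((i.toNat : Nat) : Int) + ((xs.length - i.toNat : Nat) : Int) := by
      omega
    rw [show PySem.List.pyRange i (xs.length : Int) 1
        = PySem.List.pyRange ((i.toNat : Nat) : Int)
            (((i.toNat : Nat) : Int) + ((xs.length - i.toNat : Nat) : Int)) 1 by
      rw [← h0, ← hitn]]
    rw [pvSeg_foldl xs i.toNat (xs.length - i.toNat) 0 (by omega)]
    have : (xs.drop i.toNat).take (xs.length - i.toNat) = xs.drop i.toNat :=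
      List.take_of_length_le (by simp)
    rw [this]
    ring
  rw [e1, e2]
  have := pvT_split xs i.toNat
  unfold pvE
  have harg : ((xs.drop i.toNat).map pvW).sum - pvL xs i.toNat
      = pvT xs - 2 * pvL xs i.toNat := by omega
  rw [harg]

-- errdict lookups inside the key range
theorem aErrdict_getD (xs : List String) (i : Int)
    (hi : i ∈ PySem.List.pyRange 1 (xs.length : Int) 1) :
    (aErrdict xs).getD i 0 = pvE xs i.toNat := by
  obtain ⟨hi1, hi2⟩ := PySem.List.mem_pyRange_one.mp hi
  have hitems : (aErrdict xs).items
      = (PySem.List.pyRange 1 (xs.length : Int) 1).map (fun i => (i, aErrVal xs i)) := by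
    unfold aErrdict
    simp only [PySem.List.len_eq]
    have := PySem.Dict.items_foldl_insert_fresh (PySem.List.pyRange 1 (xs.length : Int) 1)
      (fun i => i) (fun i => aErrVal xs i) PySem.Dict.empty
      (fun a _ => PySem.Dict.contains_empty a)
      (by simpa using PySem.List.nodup_pyRange_one (a := 1) (b := (xs.length : Int)))
    simpa using this
  have hnodup : (aErrdict xs).keys.Nodup := by
    unfold aErrdict
    exact PySem.Dict.nodup_keys_foldl_insert _ _ _ PySem.Dict.nodup_keys_empty
  have hmem : (i, aErrVal xs i) ∈ (aErrdict xs).items := by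
    rw [hitems]
    exact List.mem_map.mpr ⟨i, hi, rfl⟩
  rw [PySem.Dict.getD_of_mem_items _ hmem hnodup 0]
  exact aErrVal_eq xs i hi1 hi2

theorem aSorterrlist_eq (xs : List String) :
    aSorterrlist xs
      = (PySem.List.pyRange 1 (xs.length : Int) 1).map (fun i => pvE xs i.toNat) := by
  unfold aSorterrlist
  simp only [PySem.List.len_eq]
  rw [PySem.List.foldl_append_singleton_eq_map]
  simpa using List.map_congr_left (fun i hi => aErrdict_getD xs i hi)

-- B's state fold tracks (first argmin, running minimum, prefix sum)
theorem pvB_fold (xs : List String) (m : Nat) (h1 : 1 ≤ m) (h2 : m ≤ xs.length) :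
    (PySem.List.pyRange 1 ((m : Int) + 1) 1).foldl
      (fun (s : Int × Option Int × Int) i =>
        let left := s.2.2 + (PySem.Str.len (PySem.List.pyGetD xs (i - 1) "") + 1)
        let err := |pvT xs - 2 * left|
        match s.2.1 with
        | none => (i, some err, left)
        | some be => if err < be then (i, some err, left) else (s.1, some be, left))
      (0, none, 0)
    = (((pvBM xs m).1 : Int), some ((pvBM xs m).2), pvL xs m) := by
  induction m with
  | zero => omega
  | succ t ih =>
    rcases Nat.eq_zero_or_pos t with h0 | hpos
    · subst h0
      have hx0 : 0 < xs.length := by omega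
      have hr : PySem.List.pyRange 1 (((1 : Nat) : Int) + 1) 1 = [1] := by
        simpa using PySem.List.pyRange_one_singleton 1
      rw [hr]
      simp only [List.foldl_cons, List.foldl_nil]
      have hget : PySem.List.pyGetD xs ((1 : Int) - 1) "" = xs[0] := by
        norm_num
        rw [PySem.List.pyGetD_zero]
        exact List.getD_eq_getElem xs "" hx0
      have hL1 : pvL xs 1 = pvW xs[0] := by
        rw [show (1 : Nat) = 0 + 1 from rfl, pvL_succ xs 0 hx0, pvL_zero]; ring
      simp only [hget, pvBM]
      unfold pvE
      rw [hL1]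
      simp [pvW]
    · obtain ⟨t', rfl⟩ : ∃ t', t = t' + 1 := ⟨t - 1, by omega⟩
      have hr : PySem.List.pyRange 1 (((t' + 2 : Nat) : Int) + 1) 1
          = PySem.List.pyRange 1 (((t' + 1 : Nat) : Int) + 1) 1 ++ [((t' + 1 : Nat) : Int) + 1] := by
        have := PySem.List.pyRange_one_succ_right (a := 1)
          (b := ((t' + 1 : Nat) : Int) + 1) (by push_cast; omega)
        push_cast at this ⊢
        convert this using 2
      rw [hr, List.foldl_append, ih hpos (by omega)]
      simp only [List.foldl_cons, List.foldl_nil]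
      have hlt : t' + 1 < xs.length := by omega
      have hidx : ((t' + 1 : Nat) : Int) + 1 - 1 = ((t' + 1 : Nat) : Int) := by ring
      have hget : PySem.List.pyGetD xs (((t' + 1 : Nat) : Int) + 1 - 1) "" = xs[t' + 1] := by
        rw [hidx, PySem.List.pyGetD_natCast]
        exact List.getD_eq_getElem xs "" hlt
      have hLs : pvL xs (t' + 1) + (PySem.Str.len xs[t' + 1] + 1) = pvL xs (t' + 2) := by
        rw [pvL_succ xs (t' + 1) hlt]; simp [pvW]
      simp only [hget, hLs]
      have hE : |pvT xs - 2 * pvL xs (t' + 2)| = pvE xs (t' + 2) := rfl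
      rw [hE]
      by_cases hc : pvE xs (t' + 2) < (pvBM xs (t' + 1)).2
      · rw [if_pos hc]
        have : pvBM xs (t' + 2) = (t' + 2, pvE xs (t' + 2)) := by rw [pvBM, if_pos hc]
        rw [this]
        push_cast
        ring_nf
      · rw [if_neg hc]
        have : pvBM xs (t' + 2) = pvBM xs (t' + 1) := by rw [pvBM, if_neg hc]
        rw [this]


theorem hBside (xs : List String) (hn2 : 2 ≤ xs.length) :
    divide2lines_alt xs = [xs.take (pvBM xs (xs.length - 1)).1, xs.drop (pvBM xs (xs.length - 1)).1] := by
  have htotal : xs.foldl (fun a w => a + (PySem.Str.len w + 1)) 0 = pvT xs := by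
    rw [PySem.List.foldl_add xs (fun w => PySem.Str.len w + 1) 0]
    show 0 + (xs.map pvW).sum = pvT xs
    rw [zero_add]; rfl
  have hub : (xs.length : Int) = ((xs.length - 1 : Nat) : Int) + 1 := by omega
  simp only [divide2lines_alt, PySem.List.len_eq, htotal]
  rw [hub, pvB_fold xs (xs.length - 1) (by omega) (by omega)]
  rw [PySem.List.slice_to xs (by positivity), PySem.List.slice_from xs (by positivity)]
  simp

theorem hAside (xs : List String) (hn2 : 2 ≤ xs.length) :
    divide2lines xs = [xs.take (pvBM xs (xs.length - 1)).1, xs.drop (pvBM xs (xs.length - 1)).1] := by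
  obtain ⟨p1, p2, p3, p4, p5⟩ := pvBM_props xs (xs.length - 1) (by omega)
  set K := (pvBM xs (xs.length - 1)).1 with hK
  set M := (pvBM xs (xs.length - 1)).2 with hM
  have hKn : (K : Int) < (xs.length : Int) := by exact_mod_cast (by omega : K < xs.length)
  have hK1 : (1 : Int) ≤ (K : Int) := by exact_mod_cast p1
  have hKmem : ((K : Nat) : Int) ∈ PySem.List.pyRange 1 (xs.length : Int) 1 :=
    PySem.List.mem_pyRange_one.mpr ⟨hK1, hKn⟩
  have hneS : aSorterrlist xs ≠ [] := by
    rw [aSorterrlist_eq]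
    intro h
    apply_fun List.length at h
    simp [PySem.List.length_pyRange_one] at h
    omega
  have hneSorted : aSortedlist xs ≠ [] := by
    unfold aSortedlist
    rw [Ne, PySem.List.sorted_eq_nil_iff]
    exact hneS
  obtain ⟨m0, t, hsort⟩ := List.exists_cons_of_ne_nil hneSorted
  have hsort' : PySem.List.sorted (aSorterrlist xs) (fun x => x) false = m0 :: t := by
    rw [← hsort]; rfl
  have hle : ∀ y ∈ aSorterrlist xs, m0 ≤ y := by
    intro y hy
    exact PySem.List.key_head_sorted_le _ _ hsort' y hy
  have hmem0 : m0 ∈ aSorterrlist xs := by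
    have : m0 ∈ aSortedlist xs := by rw [hsort]; exact List.mem_cons_self
    unfold aSortedlist at this
    exact (PySem.List.mem_sorted _ _ _ _).mp this
  have hMS : M ∈ aSorterrlist xs := by
    rw [aSorterrlist_eq]
    refine List.mem_map.mpr ⟨(K : Int), hKmem, ?_⟩
    simp [p3]
  have hm0M : m0 = M := by
    refine le_antisymm (hle M hMS) ?_
    rw [aSorterrlist_eq] at hmem0
    obtain ⟨i, hi, rfl⟩ := List.mem_map.mp hmem0
    obtain ⟨h1, h2⟩ := PySem.List.mem_pyRange_one.mp hi
    exact p4 i.toNat (by omega) (by omega)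
  have hfind : (PySem.List.pyRange 1 (xs.length : Int) 1).find?
      (fun i => decide ((aErrdict xs).getD i 0 = m0)) = some (K : Int) := by
    rw [PySem.List.pyRange_one_append 1 (K : Int) (xs.length : Int) hK1 (le_of_lt hKn),
      List.find?_append]
    have hnone : (PySem.List.pyRange 1 (K : Int) 1).find?
        (fun i => decide ((aErrdict xs).getD i 0 = m0)) = none := by
      rw [List.find?_eq_none]
      intro i hi
      obtain ⟨h1, h2⟩ := PySem.List.mem_pyRange_one.mp hi
      have hi' : i ∈ PySem.List.pyRange 1 (xs.length : Int) 1 :=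
        PySem.List.mem_pyRange_one.mpr ⟨h1, by omega⟩
      rw [aErrdict_getD xs i hi']
      have : M < pvE xs i.toNat := p5 i.toNat (by omega) (by omega)
      simp only [decide_eq_true_eq]
      omega
    rw [hnone, Option.none_or, PySem.List.pyRange_one_cons hKn, List.find?_cons_of_pos]
    rw [aErrdict_getD xs (K : Int) hKmem]
    simp [p3, hm0M]
  have hlb : aLinebreak xs = some (K : Int) := by
    unfold aLinebreak
    simp only [PySem.List.len_eq]
    rw [pvFoldl_find (fun i => (aErrdict xs).getD i 0
      = PySem.List.pyGetD (aSortedlist xs) 0 0)]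
    rw [hsort, PySem.List.pyGetD_zero_cons]
    exact hfind
  simp only [divide2lines, PySem.List.len_eq, hlb, Option.getD_some]
  rw [pvOut_foldl xs K (by omega)]

-- ===== VERDICT (by name: the statement is the Claim_ definition above) =====
theorem divide2lines_spec : Claim_equal_divide2lines := by
  intro xs _ hpre
  unfold Spec_divide2lines
  by_cases hnil : xs = []
  · subst hnil; rfl
  · have hn2 : 2 ≤ xs.length := by
      have := List.length_pos_iff.mpr hnil
      unfold Pre_divide2lines at hpre
      omega
    rw [hAside xs hn2, hBside xs hn2]
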